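-- pv_equiv track=rewrite | github.com/YOONLEEVERSE/REAL-algorithm | yjh/2025/03/12/solution5.py | solution
-- ===== SOURCE A (Python) =====
-- def solution(k, tangerine):
--     answer = 0
--     ordered_cnt = {}
--     for t in tangerine:
--         ordered_cnt[t] = ordered_cnt.get(t, 0) + 1
--
--     ordered_cnt = dict(sorted(ordered_cnt.items(), key=lambda item: item[1], reverse=True))
--     keys = [x for x in ordered_cnt.keys()]
--     for key in keys:
--         if k <= 0:
--             break
--         cnt = ordered_cnt.pop(key)
--         k -= cnt
--         answer += 1
--
--     return answer
-- ===== SOURCE B (Python) =====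
-- def solution(k, tangerine):
--     counts = {}
--     for t in tangerine:
--         counts[t] = counts.get(t, 0) + 1
--     # bucket the frequencies: buckets[c] = how many types occur exactly c times
--     buckets = {}
--     for c in counts.values():
--         buckets[c] = buckets.get(c, 0) + 1
--     answer = 0
--     for c in range(len(tangerine), 0, -1):
--         for _ in range(buckets.get(c, 0)):
--             if k <= 0:
--                 return answer
--             k -= c
--             answer += 1
--     return answer
-- ===== Notes on version B (the rewrite author's own statement) =====
-- stated objective: alternative
-- what changed: Replaces A's sort of the counter items (and its key-by-key dict.pop loop) by an O(n) bucket count of the frequencies (a count-of-counts dict) walked from the highest possible frequency n downward with a single greedy pass.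
import Mathlib
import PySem

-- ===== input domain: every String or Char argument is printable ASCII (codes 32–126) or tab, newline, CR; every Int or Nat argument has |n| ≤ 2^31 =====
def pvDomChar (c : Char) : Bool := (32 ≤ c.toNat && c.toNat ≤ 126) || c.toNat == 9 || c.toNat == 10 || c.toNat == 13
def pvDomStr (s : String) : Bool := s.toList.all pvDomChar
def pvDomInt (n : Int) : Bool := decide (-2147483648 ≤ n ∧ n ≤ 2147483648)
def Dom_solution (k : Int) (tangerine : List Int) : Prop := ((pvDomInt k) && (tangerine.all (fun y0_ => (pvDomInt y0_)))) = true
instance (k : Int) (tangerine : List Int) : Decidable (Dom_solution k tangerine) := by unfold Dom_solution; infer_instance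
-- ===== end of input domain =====

-- B replaces A's sort of the counter items by bucket counting of the frequencies (a count-of-counts
-- dict) walked from the highest possible frequency downward; objective: alternative.

-- ===== PORT A =====
-- 'for key in keys: if k <= 0: break; cnt = ordered_cnt.pop(key); k -= cnt; answer += 1'
-- (keys are the dict's own keys, so pop never raises; the 'none' branch is unreachable)
def aLoop : List Int → PySem.Dict Int Int → Int → Int → Int
  | [], _, _, answer => answer
  | key :: rest, d, k, answer =>
    if k ≤ 0 then answer
    else
      match d.pop? key with
      | some (cnt, d') => aLoop rest d' (k - cnt) (answer + 1)
      | none => answer  -- unreachable (Python dict.pop would raise KeyError)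

def solution (k : Int) (tangerine : List Int) : Int :=
  let ordered_cnt : PySem.Dict Int Int :=
    tangerine.foldl (fun d x => d.insert x (d.getD x 0 + 1)) PySem.Dict.empty
  let ordered_cnt2 : PySem.Dict Int Int :=
    PySem.Dict.ofList (PySem.List.sorted ordered_cnt.items (fun item => item.2) true)
  aLoop ordered_cnt2.keys ordered_cnt2 k 0

-- ===== PORT B =====
-- the nested 'for c in range(len(tangerine),0,-1): for _ in range(buckets.get(c,0)):' with its
-- uniform body and early return is the greedy pass bTake over the flattened frequency sequence
def bTake : List Int → Int → Int → Int
  | [], _, answer => answer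
  | c :: rest, k, answer => if k ≤ 0 then answer else bTake rest (k - c) (answer + 1)

def solution_alt (k : Int) (tangerine : List Int) : Int :=
  let counts : PySem.Dict Int Int :=
    tangerine.foldl (fun d x => d.insert x (d.getD x 0 + 1)) PySem.Dict.empty
  let buckets : PySem.Dict Int Int :=
    counts.values.foldl (fun d x => d.insert x (d.getD x 0 + 1)) PySem.Dict.empty
  bTake ((PySem.List.pyRange (tangerine.length : Int) 0 (-1)).flatMap
          (fun c => List.replicate (buckets.getD c 0).toNat c)) k 0

-- ===== PRECONDITION & SPEC =====
def Spec_solution (k : Int) (tangerine : List Int) (out : Int) : Prop := out = solution_alt k tangerine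
instance (k : Int) (tangerine : List Int) (out : Int) : Decidable (Spec_solution k tangerine out) := by unfold Spec_solution; infer_instance

-- ===== CLAIM (what is proved, stated in full; the proofs are below) =====
def Claim_equal_solution : Prop := ∀ (k : Int) (tangerine : List Int), Dom_solution k tangerine → Spec_solution k tangerine (solution k tangerine)

-- ===== LEMMAS AND PROOFS =====

-- A's pop-driven loop over a dict's own (distinct) keys is the greedy pass over its values
theorem aLoop_eq_bTake (items : List (Int × Int)) (k a : Int)
    (h : (items.map Prod.fst).Nodup) :
    aLoop (items.map Prod.fst) (PySem.Dict.mk items) k a = bTake (items.map Prod.snd) k a := by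
  induction items generalizing k a with
  | nil => simp [aLoop, bTake]
  | cons p rest ih =>
    obtain ⟨key, v⟩ := p
    simp only [List.map_cons, List.nodup_cons, List.mem_map] at h
    simp only [List.map_cons]
    rw [aLoop, bTake]
    by_cases hk : k ≤ 0
    · simp [hk]
    · have hg : (PySem.Dict.mk ((key, v) :: rest)).pop? key = some (v, PySem.Dict.mk rest) := by
        simp only [PySem.Dict.pop?, PySem.Dict.get?_mk_cons, beq_self_eq_true, if_pos]
        simp only [PySem.Dict.erase]
        have : List.filter (fun p => !p.1 == key) ((key, v) :: rest) = rest := by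
          simp only [List.filter_cons, beq_self_eq_true, Bool.not_true, Bool.false_eq_true,
            if_false]
          rw [List.filter_eq_self]
          intro p hp
          have hne : p.1 ≠ key := fun hc => h.1 ⟨p, hp, hc⟩
          simp [hne]
        simp [this]
      rw [hg]
      simp only [hk, if_false]
      exact ih (k - v) (a + 1) h.2

-- dict(ps) keeps ps as its items when ps has distinct keys
theorem items_ofList_nodup (ps : List (Int × Int)) (h : (ps.map Prod.fst).Nodup) :
    (PySem.Dict.ofList ps).items = ps := by
  have := PySem.Dict.items_foldl_insert_fresh (l := ps) (k := Prod.fst) (v := Prod.snd)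
    (d := (PySem.Dict.empty : PySem.Dict Int Int))
    (by intro a _; exact PySem.Dict.contains_empty a.1) h
  simpa [PySem.Dict.ofList, PySem.Dict.update, PySem.Dict.empty] using this

-- the flattened bucket sequence is descending when the bucket indices are
theorem flatMap_replicate_pairwise (cs : List Int) (f : Int → Nat)
    (h : cs.Pairwise (fun a b => b < a)) :
    (cs.flatMap (fun c => List.replicate (f c) c)).Pairwise (fun a b => b ≤ a) := by
  induction cs with
  | nil => simp
  | cons c rest ih =>
    rw [List.flatMap_cons]
    rw [List.pairwise_cons] at h
    rw [List.pairwise_append]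
    refine ⟨List.pairwise_replicate.mpr (Or.inr le_rfl), ih h.2, ?_⟩
    intro x hx y hy
    rw [List.eq_of_mem_replicate hx]
    obtain ⟨c', hc', he⟩ := List.mem_flatMap.mp hy
    rw [List.eq_of_mem_replicate he]
    exact le_of_lt (h.1 c' hc')

-- multiplicity of each value in the flattened bucket sequence
theorem count_flatMap_replicate (cs : List Int) (f : Int → Nat) (x : Int)
    (h : cs.Nodup) :
    (cs.flatMap (fun c => List.replicate (f c) c)).count x = if x ∈ cs then f x else 0 := by
  induction cs with
  | nil => simp
  | cons c rest ih =>
    rw [List.flatMap_cons, List.count_append, List.count_replicate]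
    rw [List.nodup_cons] at h
    rw [ih h.2]
    by_cases hx : x = c
    · subst hx
      simp [h.1]
    · simp [hx, Ne.symm hx]

-- every frequency stored in the counter is between 1 and the list length
theorem values_counter_mem_bounds (t : List Int) (x : Int)
    (hx : x ∈ (PySem.Dict.counter t).values) :
    0 < x ∧ x ≤ (t.length : Int) := by
  have : (PySem.Dict.counter t).values
      = (PySem.Set.ofList t).map (fun kk => ((t.count kk : Nat) : Int)) := by
    show ((PySem.Dict.counter t).items).map (fun p => p.2) = _
    rw [PySem.Dict.items_counter]
    simp [List.map_map, Function.comp]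
  rw [this] at hx
  obtain ⟨kk, hk, rfl⟩ := List.mem_map.mp hx
  have hmem : kk ∈ t := (PySem.Set.mem_ofList t kk).mp hk
  constructor
  · exact_mod_cast List.count_pos_iff.mpr hmem
  · exact_mod_cast List.count_le_length

-- ===== VERDICT (by name: the statement is the Claim_ definition above) =====
theorem solution_spec : Claim_equal_solution := by
  intro k t _
  show solution k t = solution_alt k t
  show aLoop
      (PySem.Dict.ofList (PySem.List.sorted
        (t.foldl (fun d x => d.insert x (d.getD x 0 + 1)) (PySem.Dict.empty : PySem.Dict Int Int)).items
        (fun item => item.2) true)).keys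
      (PySem.Dict.ofList (PySem.List.sorted
        (t.foldl (fun d x => d.insert x (d.getD x 0 + 1)) (PySem.Dict.empty : PySem.Dict Int Int)).items
        (fun item => item.2) true)) k 0
    = bTake ((PySem.List.pyRange (t.length : Int) 0 (-1)).flatMap
        (fun c => List.replicate
          (((t.foldl (fun d x => d.insert x (d.getD x 0 + 1)) (PySem.Dict.empty : PySem.Dict Int Int)).values.foldl
              (fun d x => d.insert x (d.getD x 0 + 1)) (PySem.Dict.empty : PySem.Dict Int Int)).getD c 0).toNat c)) k 0
  rw [PySem.Dict.foldl_insert_getD_add_one_eq_counter t,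
      PySem.Dict.foldl_insert_getD_add_one_eq_counter (PySem.Dict.counter t).values]
  obtain ⟨si, hsi⟩ : ∃ si, PySem.List.sorted (PySem.Dict.counter t).items (fun item => item.2) true = si :=
    ⟨_, rfl⟩
  rw [hsi]
  have hfst : (si.map Prod.fst).Nodup := by
    have hp : (si.map Prod.fst).Perm ((PySem.Dict.counter t).items.map Prod.fst) := by
      rw [← hsi]; exact (PySem.List.sorted_perm _ _ _).map Prod.fst
    exact hp.nodup_iff.mpr (PySem.Dict.nodup_keys_counter t)
  have hd : PySem.Dict.ofList si = PySem.Dict.mk si :=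
    PySem.Dict.ext (items_ofList_nodup si hfst)
  rw [hd, show (PySem.Dict.mk si).keys = si.map Prod.fst from rfl,
      aLoop_eq_bTake si k 0 hfst]
  have hseq : (fun c => List.replicate
        ((PySem.Dict.counter (PySem.Dict.counter t).values).getD c 0).toNat c)
      = fun c => List.replicate ((PySem.Dict.counter t).values.count c) c := by
    funext c
    rw [PySem.Dict.getD_counter]
    simp
  rw [hseq]
  congr 1
  apply PySem.List.eq_of_perm_of_pairwise_le_of_injective (fun x : Int => -x) neg_injective
  · -- both lists are rearrangements of the stored frequencies
    have h1 : (si.map Prod.snd).Perm (PySem.Dict.counter t).values := by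
      rw [← hsi]; exact (PySem.List.sorted_perm _ _ _).map Prod.snd
    have hnd : (PySem.List.pyRange (t.length : Int) 0 (-1)).Nodup := by
      rw [PySem.List.pyRange_neg_one_eq_reverse]
      exact List.nodup_reverse.mpr (PySem.List.nodup_pyRange_one _ _)
    have h2 : ((PySem.List.pyRange (t.length : Int) 0 (-1)).flatMap
        (fun c => List.replicate ((PySem.Dict.counter t).values.count c) c)).Perm
          (PySem.Dict.counter t).values := by
      rw [List.perm_iff_count]
      intro x
      rw [count_flatMap_replicate _ _ _ hnd]
      by_cases hx : x ∈ PySem.List.pyRange (t.length : Int) 0 (-1)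
      · simp [hx]
      · have hxv : x ∉ (PySem.Dict.counter t).values := fun hv =>
          hx (PySem.List.mem_pyRange_neg_one.mpr (values_counter_mem_bounds t x hv))
        simp [hx, List.count_eq_zero.mpr hxv]
    exact h1.trans h2.symm
  · -- A's list is sorted descending
    have h := PySem.List.sorted_pairwise_rev (PySem.Dict.counter t).items (fun item => item.2)
    rw [hsi] at h
    rw [List.pairwise_map]
    exact h.imp (fun h => by simpa using h)
  · -- B's list is descending too
    have hdec : (PySem.List.pyRange (t.length : Int) 0 (-1)).Pairwise (fun a b => b < a) := by
      rw [PySem.List.pyRange_neg_one_eq_reverse, List.pairwise_reverse]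
      exact PySem.List.pairwise_lt_pyRange_one _ _
    exact (flatMap_replicate_pairwise _ _ hdec).imp (fun h => by simpa using h)
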